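-- pv_equiv track=rewrite | github.com/vksmadheshiya/PPT | Data Structures/assignment_5_Arrays.py | buildStairCase
-- ===== SOURCE A (Python) =====
-- def buildStairCase(n):
--     if n <= 0:
--         return 0
--     result = 0
--     for i in range(n):
--         if n >= i+1:
--             n -= i+1
--             result +=1
--     return result
-- ===== SOURCE B (Python) =====
-- def buildStairCase(n):
--     # Binary search for the largest k with k*(k+1)/2 <= n  (O(log n) instead of A's O(n) loop).
--     if n <= 0:
--         return 0
--     lo, hi = 0, n + 1
--     while hi - lo > 1:
--         mid = (lo + hi) // 2
--         if mid * (mid + 1) <= 2 * n: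
--             lo = mid
--         else:
--             hi = mid
--     return lo
-- ===== Notes on version B (the rewrite author's own statement) =====
-- stated objective: faster
-- what changed: Replaced A's linear subtract-one-row-at-a-time loop by a binary search for the largest k with k*(k+1)/2 <= n.
import Mathlib
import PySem

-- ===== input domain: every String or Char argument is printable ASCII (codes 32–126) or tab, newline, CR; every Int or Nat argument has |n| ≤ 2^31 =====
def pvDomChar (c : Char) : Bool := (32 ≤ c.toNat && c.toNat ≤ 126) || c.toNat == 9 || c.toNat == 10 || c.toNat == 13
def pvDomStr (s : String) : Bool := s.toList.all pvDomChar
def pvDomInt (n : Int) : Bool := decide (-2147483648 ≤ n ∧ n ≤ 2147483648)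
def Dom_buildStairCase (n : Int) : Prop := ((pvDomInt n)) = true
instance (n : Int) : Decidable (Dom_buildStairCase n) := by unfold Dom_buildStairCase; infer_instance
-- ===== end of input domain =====

-- B replaces A's linear row-by-row subtraction loop by a binary search for the
-- largest k with k*(k+1)/2 ≤ n (objective: faster, O(log n) vs O(n)).

-- ===== PORT A =====
-- loop body of A: state (n, result); 'if n >= i+1: n -= i+1; result += 1'
def scStep (st : Int × Int) (i : Int) : Int × Int :=
  if i + 1 ≤ st.1 then (st.1 - (i + 1), st.2 + 1) else st

def buildStairCase (n : Int) : Int :=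
  if n ≤ 0 then 0
  else ((PySem.List.pyRange 0 n 1).foldl scStep (n, 0)).2

-- ===== PORT B =====
-- the 'while hi - lo > 1' loop of Source B; fuel = hi - lo bounds the iteration count
-- (a totality guard only: the loop always exits before the fuel runs out)
def scSearch (fuel : Nat) (n lo hi : Int) : Int :=
  match fuel with
  | 0 => lo
  | f + 1 =>
    if 1 < hi - lo then
      let mid := PySem.Int.floordiv (lo + hi) 2
      if mid * (mid + 1) ≤ 2 * n then scSearch f n mid hi else scSearch f n lo mid
    else lo

def buildStairCase_alt (n : Int) : Int :=
  if n ≤ 0 then 0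
  else scSearch (n + 1).toNat n 0 (n + 1)

-- ===== PRECONDITION & SPEC =====
def Spec_buildStairCase (n : Int) (out : Int) : Prop := out = buildStairCase_alt n
instance (n : Int) (out : Int) : Decidable (Spec_buildStairCase n out) := by unfold Spec_buildStairCase; infer_instance

-- ===== CLAIM (what is proved, stated in full; the proofs are below) =====
def Claim_equal_buildStairCase : Prop := ∀ (n : Int), Dom_buildStairCase n → Spec_buildStairCase n (buildStairCase n)

-- ===== LEMMAS AND PROOFS =====

-- 'k is the number of complete staircase rows in n coins'
def scGood (n k : Int) : Prop := 0 ≤ k ∧ k * (k + 1) ≤ 2 * n ∧ 2 * n < (k + 1) * (k + 2)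

theorem scGood_unique {n k j : Int} (hk : scGood n k) (hj : scGood n j) : k = j := by
  obtain ⟨hk0, hk1, hk2⟩ := hk
  obtain ⟨hj0, hj1, hj2⟩ := hj
  by_contra hne
  rcases lt_or_gt_of_ne hne with h | h
  · nlinarith
  · nlinarith

theorem scStep_done (l : List Int) (v r : Int) (hl : ∀ i ∈ l, v ≤ i) :
    l.foldl scStep (v, r) = (v, r) := by
  induction l with
  | nil => rfl
  | cons i t ih =>
      have hi : v ≤ i := hl i (by simp)
      simp only [List.foldl_cons, scStep, if_neg (by omega : ¬ i + 1 ≤ v)]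
      exact ih (fun j hj => hl j (by simp [hj]))

theorem scLoop_good (n : Int) : ∀ (m : Nat) (a v : Int), (n - a).toNat = m → 0 ≤ a → 0 ≤ v →
    2 * n = a * (a + 1) + 2 * v →
    scGood n (((PySem.List.pyRange a n 1).foldl scStep (v, a)).2) := by
  intro m
  induction m with
  | zero =>
      intro a v hm ha hv heq
      have hna : n ≤ a := by omega
      rw [PySem.List.pyRange_one_eq_nil hna]
      simp only [List.foldl_nil]
      refine ⟨ha, by omega, ?_⟩
      -- a ≥ n and a*(a+1) ≤ 2n force a small
      have hexp : (a + 1) * (a + 2) = a * (a + 1) + 2 * (a + 1) := by ring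
      rcases eq_or_lt_of_le ha with h0 | h0
      · -- a = 0
        nlinarith
      · -- 1 ≤ a, so a*(a+1) ≥ 2a ≥ 2n
        nlinarith
  | succ m ih =>
      intro a v hm ha hv heq
      have han : a < n := by omega
      rw [PySem.List.pyRange_one_cons han]
      simp only [List.foldl_cons, scStep]
      by_cases hc : a + 1 ≤ v
      · rw [if_pos hc]
        have heq' : 2 * n = (a + 1) * (a + 1 + 1) + 2 * (v - (a + 1)) := by
          have : (a + 1) * (a + 1 + 1) = a * (a + 1) + 2 * (a + 1) := by ring
          omega
        exact ih (a + 1) (v - (a + 1)) (by omega) (by omega) (by omega) heq'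
      · rw [if_neg hc]
        have hrest : ∀ i ∈ PySem.List.pyRange (a + 1) n 1, v ≤ i := by
          intro i hi
          have := (PySem.List.mem_pyRange_one.mp hi).1
          omega
        rw [scStep_done _ _ _ hrest]
        dsimp only
        refine ⟨ha, by omega, ?_⟩
        have hexp : (a + 1) * (a + 2) = a * (a + 1) + 2 * (a + 1) := by ring
        omega

theorem scSearch_good (n : Int) : ∀ (fuel : Nat) (lo hi : Int), (hi - lo).toNat ≤ fuel →
    0 ≤ lo → lo < hi → lo * (lo + 1) ≤ 2 * n → 2 * n < hi * (hi + 1) →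
    scGood n (scSearch fuel n lo hi) := by
  intro fuel
  induction fuel with
  | zero => intro lo hi hm hlo hlt hl hh; omega
  | succ f ih =>
      intro lo hi hm hlo hlt hl hh
      rw [scSearch]
      by_cases h : 1 < hi - lo
      · rw [if_pos h]
        set mid := PySem.Int.floordiv (lo + hi) 2 with hmid
        have h1 : lo + 1 ≤ mid := by
          rw [hmid, PySem.Int.le_floordiv_iff_mul_le (by omega : (0:Int) < 2)]; omega
        have h2 : mid < hi := by
          rw [hmid, PySem.Int.floordiv_lt_iff_lt_mul (by omega : (0:Int) < 2)]; omega
        by_cases hc : mid * (mid + 1) ≤ 2 * n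
        · rw [if_pos hc]
          exact ih mid hi (by omega) (by omega) h2 hc hh
        · rw [if_neg hc]
          exact ih lo mid (by omega) hlo (by omega) hl (by omega)
      · rw [if_neg h]
        have he : hi = lo + 1 := by omega
        subst he
        exact ⟨hlo, hl, by linarith [hh]⟩

theorem portA_good (n : Int) (hn : 1 ≤ n) : scGood n (buildStairCase n) := by
  rw [buildStairCase, if_neg (by omega : ¬ n ≤ 0)]
  exact scLoop_good n (n - 0).toNat 0 n rfl (by omega) (by omega) (by ring)

theorem portB_good (n : Int) (hn : 1 ≤ n) : scGood n (buildStairCase_alt n) := by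
  rw [buildStairCase_alt, if_neg (by omega : ¬ n ≤ 0)]
  refine scSearch_good n (n + 1).toNat 0 (n + 1) (by omega) (by omega) (by omega) (by omega) ?_
  nlinarith

-- ===== VERDICT (by name: the statement is the Claim_ definition above) =====
theorem buildStairCase_spec : Claim_equal_buildStairCase := by
  intro n _
  unfold Spec_buildStairCase
  by_cases hn : n ≤ 0
  · rw [buildStairCase, buildStairCase_alt, if_pos hn, if_pos hn]
  · exact scGood_unique (portA_good n (by omega)) (portB_good n (by omega))
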